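-- pv_equiv track=rewrite | github.com/bautistagandolfo/Ingenieria-informatica | Teoria-de-algoritmos/DyC/ejercicio11.py | es_mayoritario
-- ===== SOURCE A (Python) =====
-- def obtener_candidato_recursivo(arr):
--     if not arr:
--         return None
--     if len(arr) == 1:
--         return arr[0]
--
--     sobrevivientes = []
--
--     for i in range(0, len(arr) - 1, 2):
--         if arr[i] == arr[i + 1]:
--             sobrevivientes.append(arr[i])
--
--     if len(arr) % 2 != 0:
--             sobrevivientes.append(arr[-1])
--
--     return obtener_candidato_recursivo(sobrevivientes)
--
-- def es_mayoritario(arr):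
--
--     candidato = obtener_candidato_recursivo(arr)
--
--     if candidato is None:
--         return False
--
--     cantidad = 0
--     for numero in arr:
--         if numero == candidato:
--             cantidad += 1
--
--     n = len(arr)
--
--     return cantidad > (2 * n // 3)
-- ===== SOURCE B (Python) =====
-- def es_mayoritario(arr):
--     # Iterative pairwise reduction (same heuristic as the recursive version),
--     # pairing consecutive elements with zip over one shared iterator.
--     cur = list(arr)
--     while len(cur) > 1:
--         it = iter(cur)
--         sobrevivientes = [a for a, b in zip(it, it) if a == b]
--         if len(cur) % 2 == 1:
--             sobrevivientes.append(cur[-1])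
--         cur = sobrevivientes
--     if not cur:
--         return False
--     candidato = cur[0]
--     return arr.count(candidato) > (2 * len(arr) // 3)
-- ===== Notes on version B (the rewrite author's own statement) =====
-- stated objective: alternative
-- what changed: Replaces the recursive index-based pairwise reduction (range(0,len-1,2) with arr[i]/arr[i+1] indexing and a manual counting loop) by an iterative while-loop that pairs consecutive elements via zip over one shared iterator and uses the built-in list.count for the final tally.
import Mathlib
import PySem

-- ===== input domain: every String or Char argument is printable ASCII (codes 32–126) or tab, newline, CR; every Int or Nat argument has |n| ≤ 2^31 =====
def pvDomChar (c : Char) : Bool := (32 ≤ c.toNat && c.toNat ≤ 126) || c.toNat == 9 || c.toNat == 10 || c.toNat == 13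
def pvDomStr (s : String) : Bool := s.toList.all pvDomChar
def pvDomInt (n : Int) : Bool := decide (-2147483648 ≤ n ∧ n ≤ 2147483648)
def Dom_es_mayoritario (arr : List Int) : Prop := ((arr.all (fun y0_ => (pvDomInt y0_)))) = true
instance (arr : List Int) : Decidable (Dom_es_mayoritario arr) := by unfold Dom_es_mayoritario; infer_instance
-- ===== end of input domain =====

-- B replaces A's recursive index-based pairwise reduction by an iterative while-loop pairing
-- consecutive elements (zip over one shared iterator) and uses list.count for the final tally;
-- same cost, different decomposition. Neither implementation mutates its argument.

-- ===== PORT A =====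
-- 'for i in range(0, len(arr) - 1, 2): if arr[i] == arr[i + 1]: sobrevivientes.append(arr[i])'
-- (indices produced by the range are always in bounds, so pyGetD's default is never read)
def pvSurvA (arr : List Int) : List Int :=
  (PySem.List.pyRange 0 ((arr.length : Int) - 1) 2).foldl
    (fun acc i => if PySem.List.pyGetD arr i 0 = PySem.List.pyGetD arr (i + 1) 0
                  then acc ++ [PySem.List.pyGetD arr i 0] else acc) []

-- 'if len(arr) % 2 != 0: sobrevivientes.append(arr[-1])'
def pvStepA (arr : List Int) : List Int :=
  if (arr.length : Int) % 2 ≠ 0 then pvSurvA arr ++ [PySem.List.pyGetD arr (-1) 0]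
  else pvSurvA arr

-- termination lemma for the recursion below (the survivor list shrinks)
theorem pvSurvA_len (arr : List Int) : (pvSurvA arr).length ≤ arr.length / 2 := by
  unfold pvSurvA
  rw [PySem.List.foldl_append_ite]
  simp only [List.nil_append, List.length_map]
  have h1 := List.length_filter_le
    (fun i => decide (PySem.List.pyGetD arr i 0 = PySem.List.pyGetD arr (i + 1) 0))
    (PySem.List.pyRange 0 ((arr.length : Int) - 1) 2)
  have h2 : (PySem.List.pyRange 0 ((arr.length : Int) - 1) 2).length ≤ arr.length / 2 := by
    rw [PySem.List.pyRange_of_pos _ _ (by norm_num)]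
    simp only [List.length_map, List.length_range]
    split_ifs with h <;> omega
  omega

theorem pvStepA_len (arr : List Int) (h : 1 < arr.length) : (pvStepA arr).length < arr.length := by
  have hs := pvSurvA_len arr
  unfold pvStepA
  split_ifs with hodd
  · have : (arr.length : Int) % 2 = 1 := by omega
    have : arr.length % 2 = 1 := by omega
    simp only [List.length_append, List.length_cons, List.length_nil]
    omega
  · omega

def obtener_candidato_recursivo (arr : List Int) : Option Int :=
  if arr = [] then none
  else if arr.length = 1 then some (PySem.List.pyGetD arr 0 0)
  else obtener_candidato_recursivo (pvStepA arr)
termination_by arr.length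
decreasing_by
  exact pvStepA_len arr (by
    rcases arr with _ | ⟨x, _ | ⟨y, t⟩⟩ <;> simp_all)

def es_mayoritario (arr : List Int) : Bool :=
  match obtener_candidato_recursivo arr with
  | none => false
  | some candidato =>
    let cantidad : Int :=
      arr.foldl (fun cant numero => if numero = candidato then cant + 1 else cant) 0
    decide (cantidad > PySem.Int.floordiv (2 * (arr.length : Int)) 3)

-- ===== PORT B =====
-- 'zip(it, it)' over one shared iterator pairs consecutive elements; ported structurally (exact)
def pvPairs : List Int → List (Int × Int)
  | a :: b :: rest => (a, b) :: pvPairs rest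
  | _ => []

-- '[a for a, b in zip(it, it) if a == b]'
def pvSurvB (cur : List Int) : List Int :=
  ((pvPairs cur).filter (fun p => p.1 == p.2)).map (fun p => p.1)

-- 'if len(cur) % 2 == 1: sobrevivientes.append(cur[-1])'
def pvStepB (cur : List Int) : List Int :=
  if (cur.length : Int) % 2 = 1 then pvSurvB cur ++ [PySem.List.pyGetD cur (-1) 0]
  else pvSurvB cur

theorem pvPairs_length (l : List Int) : (pvPairs l).length = l.length / 2 := by
  induction l using pvPairs.induct with
  | case1 a b rest ih => simp [pvPairs, ih]; omega
  | case2 l hl =>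
    rcases l with _ | ⟨x, _ | ⟨y, t⟩⟩
    · simp [pvPairs]
    · simp [pvPairs]
    · exact (hl x y t rfl).elim

theorem pvStepB_len (cur : List Int) (h : 1 < cur.length) : (pvStepB cur).length < cur.length := by
  have hs : (pvSurvB cur).length ≤ cur.length / 2 := by
    unfold pvSurvB
    simp only [List.length_map]
    have hf := List.length_filter_le (fun p : Int × Int => p.1 == p.2) (pvPairs cur)
    have hp := pvPairs_length cur
    omega
  unfold pvStepB
  split_ifs with hodd
  · have : cur.length % 2 = 1 := by omega
    simp only [List.length_append, List.length_cons, List.length_nil]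
    omega
  · omega

-- 'while len(cur) > 1: cur = sobrevivientes'
def pvLoopB (cur : List Int) : List Int :=
  if h : 1 < cur.length then pvLoopB (pvStepB cur) else cur
termination_by cur.length
decreasing_by exact pvStepB_len cur h

def es_mayoritario_alt (arr : List Int) : Bool :=
  match pvLoopB arr with
  | [] => false
  | candidato :: _ =>
    decide ((PySem.List.count arr candidato : Int) > PySem.Int.floordiv (2 * (arr.length : Int)) 3)

-- ===== PRECONDITION & SPEC =====
def Spec_es_mayoritario (arr : List Int) (out : Bool) : Prop := out = es_mayoritario_alt arr
instance (arr : List Int) (out : Bool) : Decidable (Spec_es_mayoritario arr out) := by unfold Spec_es_mayoritario; infer_instance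

-- ===== CLAIM (what is proved, stated in full; the proofs are below) =====
def Claim_equal_es_mayoritario : Prop := ∀ (arr : List Int), Dom_es_mayoritario arr → Spec_es_mayoritario arr (es_mayoritario arr)

-- ===== LEMMAS AND PROOFS =====

-- A's fold as a filter-and-map over the index range
theorem pvSurvA_eq_filter (arr : List Int) :
    pvSurvA arr = ((PySem.List.pyRange 0 ((arr.length : Int) - 1) 2).filter
        (fun i => decide (PySem.List.pyGetD arr i 0 = PySem.List.pyGetD arr (i + 1) 0))).map
        (fun i => PySem.List.pyGetD arr i 0) := by
  unfold pvSurvA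
  rw [PySem.List.foldl_append_ite]
  simp

-- splitting off the first index of a step-2 range
theorem pyRange_two_cons (m : Int) (h : 0 < m) :
    PySem.List.pyRange 0 m 2 = 0 :: (PySem.List.pyRange 0 (m - 2) 2).map (· + 2) := by
  rw [PySem.List.pyRange_of_pos _ _ (by norm_num : (0:Int) < 2),
      PySem.List.pyRange_of_pos _ _ (by norm_num : (0:Int) < 2)]
  have hcnt : (if (0:Int) < m then ((m - 0 + 2 - 1) / 2).toNat else 0)
      = (if (0:Int) < m - 2 then ((m - 2 - 0 + 2 - 1) / 2).toNat else 0) + 1 := by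
    split_ifs <;> omega
  rw [hcnt, List.range_succ_eq_map]
  simp only [List.map_cons, List.map_map]
  congr 1

-- shifting a nonnegative index past one cons cell
theorem pvGetD_cons_shift (a d i : Int) (l : List Int) (h : 0 ≤ i) :
    PySem.List.pyGetD (a :: l) (i + 1) d = PySem.List.pyGetD l i d := by
  have : i = ((i.toNat : Nat) : Int) := (Int.toNat_of_nonneg h).symm
  rw [this]
  have h1 : ((i.toNat : Nat) : Int) + 1 = (((i.toNat + 1 : Nat)) : Int) := by push_cast; ring
  rw [h1, PySem.List.pyGetD_natCast, PySem.List.pyGetD_natCast]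
  simp [List.getD]

-- the crux: A's survivor pass peels off one pair
theorem pvSurvA_cons (a b : Int) (rest : List Int) :
    pvSurvA (a :: b :: rest) = (if a = b then [a] else []) ++ pvSurvA rest := by
  rw [pvSurvA_eq_filter, pvSurvA_eq_filter]
  have hlen : ((a :: b :: rest).length : Int) - 1 = (rest.length : Int) + 1 := by
    simp
  rw [hlen, pyRange_two_cons _ (by positivity)]
  have hm : ((rest.length : Int) + 1) - 2 = (rest.length : Int) - 1 := by ring
  rw [hm]
  simp only [List.filter_cons, List.filter_map]
  have h0 : (decide (PySem.List.pyGetD (a :: b :: rest) 0 0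
      = PySem.List.pyGetD (a :: b :: rest) (0 + 1) 0)) = decide (a = b) := by
    rw [pvGetD_cons_shift a 0 0 (b :: rest) le_rfl]
    simp [PySem.List.pyGetD_zero_cons]
  rw [h0]
  have hshift : ∀ i ∈ PySem.List.pyRange 0 ((rest.length : Int) - 1) 2,
      PySem.List.pyGetD (a :: b :: rest) (i + 2) 0 = PySem.List.pyGetD rest i 0 ∧
      PySem.List.pyGetD (a :: b :: rest) (i + 2 + 1) 0 = PySem.List.pyGetD rest (i + 1) 0 := by
    intro i hi
    have h0i : 0 ≤ i := ((PySem.List.mem_pyRange_iff_of_pos (by norm_num)  i).mp hi).1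
    constructor
    · have : i + 2 = (i + 1) + 1 := by ring
      rw [this, pvGetD_cons_shift a 0 (i+1) _ (by omega), pvGetD_cons_shift b 0 i _ h0i]
    · have : i + 2 + 1 = (i + 1 + 1) + 1 := by ring
      rw [this, pvGetD_cons_shift a 0 (i+1+1) _ (by omega),
          pvGetD_cons_shift b 0 (i+1) _ (by omega)]
  have hfilter : (PySem.List.pyRange 0 ((rest.length : Int) - 1) 2).filter
      ((fun i => decide (PySem.List.pyGetD (a :: b :: rest) i 0
          = PySem.List.pyGetD (a :: b :: rest) (i + 1) 0)) ∘ (· + 2))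
      = (PySem.List.pyRange 0 ((rest.length : Int) - 1) 2).filter
      (fun i => decide (PySem.List.pyGetD rest i 0 = PySem.List.pyGetD rest (i + 1) 0)) := by
    apply List.filter_congr
    intro i hi
    obtain ⟨h1, h2⟩ := hshift i hi
    simp only [Function.comp]
    rw [h1, h2]
  rw [hfilter]
  have hmap : List.map (fun i => PySem.List.pyGetD (a :: b :: rest) i 0)
      (List.map (· + 2) ((PySem.List.pyRange 0 ((rest.length : Int) - 1) 2).filter
        (fun i => decide (PySem.List.pyGetD rest i 0 = PySem.List.pyGetD rest (i + 1) 0))))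
      = List.map (fun i => PySem.List.pyGetD rest i 0)
      ((PySem.List.pyRange 0 ((rest.length : Int) - 1) 2).filter
        (fun i => decide (PySem.List.pyGetD rest i 0 = PySem.List.pyGetD rest (i + 1) 0))) := by
    rw [List.map_map]
    apply List.map_congr_left
    intro i hi
    exact (hshift i (List.mem_filter.mp hi).1).1
  by_cases hab : a = b
  · rw [if_pos (show decide (a = b) = true by simp [hab]), if_pos hab]
    simp only [List.map_cons, hmap, PySem.List.pyGetD_zero_cons, List.cons_append,
      List.nil_append]
  · rw [if_neg (show ¬ decide (a = b) = true by simp [hab]), if_neg hab]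
    rw [hmap, List.nil_append]

theorem pvSurvA_eq_pvSurvB (arr : List Int) : pvSurvA arr = pvSurvB arr := by
  induction arr using pvPairs.induct with
  | case1 a b rest ih =>
    rw [pvSurvA_cons, ih]
    simp only [pvSurvB, pvPairs, List.filter_cons]
    by_cases hab : a = b <;> simp [hab]
  | case2 l hl =>
    have : pvSurvB l = [] := by
      rcases l with _ | ⟨x, _ | ⟨y, t⟩⟩
      · rfl
      · rfl
      · exact absurd rfl (by intro h; exact (hl x y t h).elim)
    rw [this, pvSurvA_eq_filter]
    rcases l with _ | ⟨x, _ | ⟨y, t⟩⟩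
    · simp [PySem.List.pyRange_of_pos _ _ (by norm_num : (0:Int) < 2)]
    · simp [PySem.List.pyRange_of_pos _ _ (by norm_num : (0:Int) < 2)]
    · exact (hl x y t rfl).elim

theorem pvStepA_eq_pvStepB (arr : List Int) : pvStepA arr = pvStepB arr := by
  unfold pvStepA pvStepB
  rw [pvSurvA_eq_pvSurvB]
  by_cases h : (arr.length : Int) % 2 = 1
  · rw [if_pos (show ((arr.length : Int) % 2 ≠ 0) by omega), if_pos h]
  · rw [if_neg (show ¬((arr.length : Int) % 2 ≠ 0) by omega), if_neg h]

-- the candidate computed by A's recursion is the head of B's loop result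
theorem pvCand_eq (arr : List Int) :
    obtener_candidato_recursivo arr = (pvLoopB arr).head? := by
  induction arr using obtener_candidato_recursivo.induct with
  | case1 =>
    rw [obtener_candidato_recursivo, pvLoopB]
    simp
  | case2 arr hne h1 =>
    rw [obtener_candidato_recursivo, pvLoopB]
    rcases arr with _ | ⟨x, t⟩
    · exact (hne rfl).elim
    · have : t = [] := by simpa using h1
      subst this
      simp [PySem.List.pyGetD_zero_cons]
  | case3 arr hne h1 ih =>
    have hlen : 1 < arr.length := by
      rcases arr with _ | ⟨x, _ | ⟨y, t⟩⟩ <;> simp_all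
    rw [obtener_candidato_recursivo, pvLoopB]
    simp only [if_neg hne, if_neg h1, dif_pos hlen]
    rw [ih, pvStepA_eq_pvStepB]

-- A's counting loop is list.count
theorem pvCount_eq (arr : List Int) (c : Int) :
    arr.foldl (fun cant numero => if numero = c then cant + 1 else cant) 0
      = (PySem.List.count arr c : Int) := by
  rw [PySem.List.foldl_ite_add_one (fun numero => numero = c) arr 0, PySem.List.count_eq]
  have : List.countP (fun x => decide (x = c)) arr = List.count c arr := by
    unfold List.count
    apply List.countP_congr
    intro x _
    simp [beq_iff_eq]
  rw [this]
  ring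

-- ===== VERDICT (by name: the statement is the Claim_ definition above) =====
theorem es_mayoritario_spec : Claim_equal_es_mayoritario := by
  intro arr _
  unfold Spec_es_mayoritario es_mayoritario es_mayoritario_alt
  rw [pvCand_eq]
  cases h : pvLoopB arr with
  | nil => simp
  | cons c t => simp [pvCount_eq]
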